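-- pv_equiv track=rewrite | github.com/UwB-Tech-Innovators-Inc/Petanque | algorythm.py | group_by_win_count
-- ===== SOURCE A (Python) =====
-- def group_by_win_count(teams):
--     sorted_teams = [[]]
--     for i in range(len(teams)):
--         sorted_teams.append([])
--         for team_name in teams:
--             if teams[team_name] == i:
--                 sorted_teams[i].append(team_name)
--     sorted_teams.reverse()
--     return sorted_teams
-- ===== SOURCE B (Python) =====
-- def group_by_win_count(teams):
--     n = len(teams)
--     buckets = [[] for _ in range(n)]
--     for name, wins in teams.items():
--         if 0 <= wins < n:
--             buckets[wins].append(name)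
--     out = [[]]
--     out.extend(reversed(buckets))
--     return out
-- ===== Notes on version B (the rewrite author's own statement) =====
-- stated objective: faster
-- what changed: A rescans the whole dict once per possible win count (nested loops); B makes a single pass dropping each team into a bucket list indexed by its win count, then prepends the sentinel empty list and reverses.
import Mathlib
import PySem

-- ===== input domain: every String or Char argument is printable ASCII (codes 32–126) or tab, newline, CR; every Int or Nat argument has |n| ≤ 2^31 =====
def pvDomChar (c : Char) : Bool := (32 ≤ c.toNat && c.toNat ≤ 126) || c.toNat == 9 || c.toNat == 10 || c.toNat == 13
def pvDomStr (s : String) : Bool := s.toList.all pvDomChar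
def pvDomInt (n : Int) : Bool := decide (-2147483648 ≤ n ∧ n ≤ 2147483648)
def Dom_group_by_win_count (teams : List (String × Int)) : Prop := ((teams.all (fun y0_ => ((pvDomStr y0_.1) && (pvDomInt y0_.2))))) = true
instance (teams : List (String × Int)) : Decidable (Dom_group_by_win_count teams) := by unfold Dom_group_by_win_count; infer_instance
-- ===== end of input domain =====

-- B replaces A's nested scan (for each win count, rescan all teams) by one pass that
-- drops each team into the bucket indexed by its win count; asymptotically faster.
-- `teams` is a Python dict: both ports decode the association list with PySem.Dict.ofList.

-- ===== PORT A =====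
def group_by_win_count (teams : List (String × Int)) : List (List String) :=
  let d := PySem.Dict.ofList teams
  let st :=
    (List.range d.size).foldl
      (fun st (i : Nat) =>
        let st := st ++ [[]]
        d.items.foldl
          (fun st kv =>
            if d.getD kv.1 0 = (i : Int) then st.set i (st.getD i [] ++ [kv.1]) else st)
          st)
      [[]]
  st.reverse

-- ===== PORT B =====
def group_by_win_count_alt (teams : List (String × Int)) : List (List String) :=
  let d := PySem.Dict.ofList teams
  let n := d.size
  let buckets :=
    d.items.foldl
      (fun b kv =>
        if 0 ≤ kv.2 ∧ kv.2 < (n : Int) then b.set kv.2.toNat (b.getD kv.2.toNat [] ++ [kv.1]) else b)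
      (List.replicate n [])
  [[]] ++ buckets.reverse

-- ===== PRECONDITION & SPEC =====
def Spec_group_by_win_count (teams : List (String × Int)) (out : List (List String)) : Prop := out = group_by_win_count_alt teams
instance (teams : List (String × Int)) (out : List (List String)) : Decidable (Spec_group_by_win_count teams out) := by unfold Spec_group_by_win_count; infer_instance

-- ===== CLAIM (what is proved, stated in full; the proofs are below) =====
def Claim_equal_group_by_win_count : Prop := ∀ (teams : List (String × Int)), Dom_group_by_win_count teams → Spec_group_by_win_count teams (group_by_win_count teams)

-- ===== LEMMAS AND PROOFS =====

-- the bucket for win count i, read off a pair list in one filter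
def pvBucket (l : List (String × Int)) (i : Nat) : List String :=
  (l.filter (fun kv => kv.2 = (i : Int))).map Prod.fst

theorem pvGetD_set_self (l : List (List String)) (i : Nat) (x : List String)
    (h : i < l.length) : (l.set i x).getD i [] = x := by
  simp only [List.getD]
  rw [List.getElem?_set_self h]
  rfl

theorem pvGetD_set_ne (l : List (List String)) (i j : Nat) (x : List String)
    (h : j ≠ i) : (l.set i x).getD j [] = l.getD j [] := by
  simp only [List.getD]
  rw [List.getElem?_set_ne (Ne.symm h)]

-- A's inner loop appends exactly bucket i at index i
theorem innerA_eq (l : List (String × Int)) (st : List (List String)) (i : Nat)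
    (hi : i < st.length) :
    l.foldl (fun st kv => if kv.2 = (i : Int) then st.set i (st.getD i [] ++ [kv.1]) else st) st
      = st.set i (st.getD i [] ++ pvBucket l i) := by
  induction l generalizing st with
  | nil =>
      rw [List.foldl_nil]
      simp only [pvBucket, List.filter_nil, List.map_nil, List.append_nil]
      rw [List.getD_eq_getElem st [] hi]
      exact (List.set_getElem_self hi).symm
  | cons kv t ih =>
      simp only [List.foldl_cons]
      by_cases hc : kv.2 = (i : Int)
      · rw [if_pos hc, ih _ (by simpa using hi)]
        rw [pvGetD_set_self st i _ hi, List.set_set]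
        congr 1
        simp [pvBucket, hc, List.append_assoc]
      · rw [if_neg hc, ih _ hi]
        congr 1
        simp [pvBucket, hc]

-- A's outer loop builds the buckets 0..k-1 followed by one empty list
theorem outerA_eq (l : List (String × Int)) (k : Nat) :
    (List.range k).foldl
      (fun st (i : Nat) =>
        let st := st ++ [[]]
        l.foldl (fun st kv => if kv.2 = (i : Int) then st.set i (st.getD i [] ++ [kv.1]) else st) st)
      [[]]
      = (List.range k).map (pvBucket l) ++ [[]] := by
  induction k with
  | zero => simp
  | succ k ih =>
      rw [List.range_succ, List.foldl_append, ih]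
      simp only [List.foldl_cons, List.foldl_nil]
      rw [List.append_assoc]
      set M := (List.range k).map (pvBucket l) with hM
      have hlen : M.length = k := by simp [hM]
      rw [innerA_eq l _ k (by simp [hlen])]
      have h1 : (M ++ ([[]] ++ [[]])).getD k [] = [] := by
        rw [List.getD_eq_getElem (M ++ ([[]] ++ [[]])) [] (by simp [hlen]),
            List.getElem_append_right (by omega)]
        simp [hlen]
      rw [h1]
      have h2 : (M ++ ([[]] ++ [[]])).set k ([] ++ pvBucket l k) = M ++ [pvBucket l k, []] := by
        rw [← hlen]; simp
      rw [h2]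
      simp [hM]

-- B's single pass preserves the length
theorem lenB (l : List (String × Int)) (n : Nat) (b : List (List String)) (hb : b.length = n) :
    (l.foldl (fun b kv => if 0 ≤ kv.2 ∧ kv.2 < (n : Int) then b.set kv.2.toNat (b.getD kv.2.toNat [] ++ [kv.1]) else b) b).length = n := by
  induction l generalizing b with
  | nil => simpa using hb
  | cons kv t ih =>
      simp only [List.foldl_cons]
      split
      · exact ih _ (by simpa using hb)
      · exact ih _ hb

-- B's single pass, read at index j, appends exactly bucket j
theorem getB (l : List (String × Int)) (n : Nat) (b : List (List String)) (hb : b.length = n)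
    (j : Nat) (hj : j < n) :
    (l.foldl (fun b kv => if 0 ≤ kv.2 ∧ kv.2 < (n : Int) then b.set kv.2.toNat (b.getD kv.2.toNat [] ++ [kv.1]) else b) b).getD j []
      = b.getD j [] ++ pvBucket l j := by
  induction l generalizing b with
  | nil => simp [pvBucket]
  | cons kv t ih =>
      simp only [List.foldl_cons]
      by_cases hg : 0 ≤ kv.2 ∧ kv.2 < (n : Int)
      · rw [if_pos hg, ih _ (by simpa using hb)]
        by_cases hji : j = kv.2.toNat
        · have hv : kv.2 = (j : Int) := by omega
          rw [show kv.2.toNat = j from hji.symm, pvGetD_set_self b j _ (by omega)]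
          have hbk : pvBucket (kv :: t) j = kv.1 :: pvBucket t j := by
            simp [pvBucket, hv]
          rw [hbk, List.append_assoc]
          rfl
        · have hv : ¬ kv.2 = (j : Int) := by omega
          rw [pvGetD_set_ne b _ j _ hji]
          simp [pvBucket, hv]
      · rw [if_neg hg, ih _ hb]
        have hv : ¬ kv.2 = (j : Int) := by omega
        simp [pvBucket, hv]

-- hence B's bucket array is the list of buckets 0..n-1
theorem bucketsB_eq (l : List (String × Int)) (n : Nat) :
    l.foldl (fun b kv => if 0 ≤ kv.2 ∧ kv.2 < (n : Int) then b.set kv.2.toNat (b.getD kv.2.toNat [] ++ [kv.1]) else b) (List.replicate n [])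
      = (List.range n).map (pvBucket l) := by
  apply List.ext_getElem
  · rw [lenB l n _ (by simp)]; simp
  · intro j h1 h2
    have hj : j < n := by simpa using h2
    have h := getB l n (List.replicate n []) (by simp) j hj
    rw [List.getD_eq_getElem _ [] h1,
        show (List.replicate n ([] : List String)).getD j [] = [] from by
          simp only [List.getD, List.getElem?_replicate]
          split <;> rfl] at h
    rw [h]
    simp

-- ===== VERDICT (by name: the statement is the Claim_ definition above) =====
theorem group_by_win_count_spec : Claim_equal_group_by_win_count := by
  intro teams _
  unfold Spec_group_by_win_count group_by_win_count group_by_win_count_alt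
  set d := PySem.Dict.ofList teams with hd
  have hcong : ∀ (st : List (List String)) (i : Nat),
      d.items.foldl (fun st kv => if d.getD kv.1 0 = (i : Int) then st.set i (st.getD i [] ++ [kv.1]) else st) st
        = d.items.foldl (fun st kv => if kv.2 = (i : Int) then st.set i (st.getD i [] ++ [kv.1]) else st) st := by
    intro st i
    apply PySem.List.foldl_congr_mem
    intro acc kv hkv
    obtain ⟨k, v⟩ := kv
    have hnd : d.keys.Nodup := by rw [hd]; exact PySem.Dict.nodup_keys_ofList teams
    have hkv2 : d.getD (k, v).1 0 = v := PySem.Dict.getD_of_mem_items d hkv hnd 0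
    rw [hkv2]
  simp only [hcong]
  rw [outerA_eq d.items d.size, bucketsB_eq d.items d.size]
  simp [List.reverse_append]
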